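-- pv_equiv track=rewrite | github.com/mukerem/WebScrapping | codeforces/archive/Cutting_Banner_538A.py | is_cut_possible
-- ===== SOURCE A (Python) =====
-- def is_cut_possible(word: str) -> bool:
--     # Check CODEFORCES is found in the end of the string
--     if word[:10] == 'CODEFORCES':
--         return True
--     if word[-10: ] == 'CODEFORCES':
--         return True
--
--     # check two partiton of the word which is the first i characters and the last 10-i characters.
--     code = 'CODEFORCES'
--     for i in range(1, 10):
--         if word[:i] == code[:i] and word[i-10:] == code[i-10:]:
--             return True
--     return False
-- ===== SOURCE B (Python) =====
-- def _match_len(xs, ys):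
--     # number of leading positions where xs and ys agree
--     k = 0
--     for a, b in zip(xs, ys):
--         if a != b:
--             break
--         k += 1
--     return k
--
--
-- def is_cut_possible(word: str) -> bool:
--     target = 'CODEFORCES'
--     p = _match_len(word, target)            # longest common prefix with CODEFORCES (<= 10)
--     s = _match_len(word[::-1], target[::-1])  # longest common suffix with CODEFORCES (<= 10)
--     return len(word) >= 10 and p + s >= 10
-- ===== Notes on version B (the rewrite author's own statement) =====
-- stated objective: simpler
-- what changed: Replaces the 12 explicit prefix/suffix slice comparisons (the two whole-word checks plus the 10-way split loop) by two single character scans computing the longest common prefix p and suffix s with CODEFORCES, returning len(word) >= 10 and p + s >= 10.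
import Mathlib
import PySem

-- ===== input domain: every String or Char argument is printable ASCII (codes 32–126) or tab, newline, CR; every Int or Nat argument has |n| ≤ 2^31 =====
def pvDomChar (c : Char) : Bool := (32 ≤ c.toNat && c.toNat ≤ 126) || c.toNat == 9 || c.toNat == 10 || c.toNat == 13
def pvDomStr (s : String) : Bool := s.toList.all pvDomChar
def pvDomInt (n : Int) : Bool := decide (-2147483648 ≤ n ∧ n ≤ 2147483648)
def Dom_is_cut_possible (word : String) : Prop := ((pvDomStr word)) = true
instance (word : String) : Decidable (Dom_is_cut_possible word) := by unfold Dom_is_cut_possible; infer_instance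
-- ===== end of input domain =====

-- B replaces A's 12 slice comparisons (two whole-word checks plus a 10-way split loop)
-- by two single scans computing the longest common prefix/suffix with CODEFORCES and one
-- arithmetic test; objective: simpler.

-- ===== PORT A =====
def is_cut_possible (word : String) : Bool :=
  let w := word.toList
  -- if word[:10] == 'CODEFORCES': return True
  if PySem.List.slice w none (some 10) == "CODEFORCES".toList then true
  -- if word[-10:] == 'CODEFORCES': return True
  else if PySem.List.slice w (some (-10)) none == "CODEFORCES".toList then true
  else
    -- for i in range(1, 10): if word[:i] == code[:i] and word[i-10:] == code[i-10:]: return True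
    let code := "CODEFORCES".toList
    (PySem.List.pyRange 1 10 1).any (fun i =>
      (PySem.List.slice w none (some i) == PySem.List.slice code none (some i)) &&
      (PySem.List.slice w (some (i - 10)) none == PySem.List.slice code (some (i - 10)) none))

-- ===== PORT B =====
-- _match_len: number of leading positions where the two sequences agree
def matchLen : List Char → List Char → Nat
  | a :: as, b :: bs => if a = b then matchLen as bs + 1 else 0
  | _, _ => 0

def is_cut_possible_alt (word : String) : Bool :=
  let w := word.toList
  let target := "CODEFORCES".toList
  let p := matchLen w target
  let s := matchLen w.reverse target.reverse
  decide (10 ≤ w.length) && decide (10 ≤ p + s)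

-- ===== PRECONDITION & SPEC =====
def Spec_is_cut_possible (word : String) (out : Bool) : Prop := out = is_cut_possible_alt word
instance (word : String) (out : Bool) : Decidable (Spec_is_cut_possible word out) := by unfold Spec_is_cut_possible; infer_instance

-- ===== CLAIM (what is proved, stated in full; the proofs are below) =====
def Claim_equal_is_cut_possible : Prop := ∀ (word : String), Dom_is_cut_possible word → Spec_is_cut_possible word (is_cut_possible word)

-- ===== LEMMAS AND PROOFS =====

theorem matchLen_le_left : ∀ (xs ys : List Char), matchLen xs ys ≤ xs.length := by
  intro xs
  induction xs with
  | nil => intro ys; cases ys <;> simp [matchLen]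
  | cons a as ih =>
    intro ys
    cases ys with
    | nil => simp [matchLen]
    | cons b bs =>
      simp only [matchLen]
      split
      · simpa using ih bs
      · simp

theorem matchLen_le_right : ∀ (xs ys : List Char), matchLen xs ys ≤ ys.length := by
  intro xs
  induction xs with
  | nil => intro ys; cases ys <;> simp [matchLen]
  | cons a as ih =>
    intro ys
    cases ys with
    | nil => simp [matchLen]
    | cons b bs =>
      simp only [matchLen]
      split
      · simpa using ih bs
      · simp

-- take i of each side agree iff the first i positions match (when ys is long enough)
theorem take_eq_iff_le_matchLen : ∀ (i : Nat) (xs ys : List Char), i ≤ ys.length →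
    (xs.take i = ys.take i ↔ i ≤ matchLen xs ys) := by
  intro i
  induction i with
  | zero => intro xs ys _; simp
  | succ i ih =>
    intro xs ys hy
    cases ys with
    | nil => simp at hy
    | cons b bs =>
      cases xs with
      | nil =>
        simp [matchLen]
      | cons a as =>
        simp only [List.take_succ_cons, List.cons.injEq, matchLen]
        by_cases hab : a = b
        · rw [if_pos hab, ih as bs (by simpa using hy)]
          constructor
          · rintro ⟨-, h⟩; omega
          · intro h; exact ⟨hab, by omega⟩
        · rw [if_neg hab]
          constructor
          · rintro ⟨h, -⟩; exact absurd h hab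
          · intro h; omega

theorem getD_eq_of_lt_matchLen : ∀ (xs ys : List Char) (j : Nat), j < matchLen xs ys →
    xs.getD j ' ' = ys.getD j ' ' := by
  intro xs
  induction xs with
  | nil => intro ys j h; cases ys <;> simp [matchLen] at h
  | cons a as ih =>
    intro ys j h
    cases ys with
    | nil => simp [matchLen] at h
    | cons b bs =>
      simp only [matchLen] at h
      by_cases hab : a = b
      · rw [if_pos hab] at h
        cases j with
        | zero => simpa using hab
        | succ j => simpa using ih bs j (by omega)
      · rw [if_neg hab] at h; omega

-- the 10-character target, as a literal list
def codeL : List Char := ['C', 'O', 'D', 'E', 'F', 'O', 'R', 'C', 'E', 'S']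

theorem codeL_eq : "CODEFORCES".toList = codeL := rfl

theorem codeL_len : codeL.length = 10 := rfl

-- CODEFORCES is not self-overlapping: no word of n < 10 characters matches a prefix of
-- length p and a suffix of length s of it with p + s ≥ 10
theorem noShortOverlap : ∀ (n p s : Fin 10), 5 ≤ n.val → p.val ≤ n.val → s.val ≤ n.val →
    10 ≤ p.val + s.val →
    ∃ j : Fin 10, n.val - s.val ≤ j.val ∧ j.val < p.val ∧
      codeL.getD j.val ' ' ≠ codeL.getD (j.val + (10 - n.val)) ' ' := by
  decide

theorem length_ge_ten_of_overlap (w : List Char) (hn : w.length ≤ 9)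
    (h : 10 ≤ matchLen w codeL + matchLen w.reverse codeL.reverse) : False := by
  have hpw := matchLen_le_left w codeL
  have hsw := matchLen_le_left w.reverse codeL.reverse
  rw [List.length_reverse] at hsw
  have hn5 : 5 ≤ w.length := by omega
  obtain ⟨j, hjs, hjp, hne⟩ :=
    noShortOverlap ⟨w.length, by omega⟩ ⟨matchLen w codeL, by omega⟩
      ⟨matchLen w.reverse codeL.reverse, by omega⟩ hn5 hpw hsw h
  apply hne
  simp only at hjs hjp ⊢
  have h1 : w.getD j.val ' ' = codeL.getD j.val ' ' := getD_eq_of_lt_matchLen _ _ _ hjp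
  have hs1 : 1 ≤ matchLen w.reverse codeL.reverse := by omega
  have ht : w.length - 1 - j.val < matchLen w.reverse codeL.reverse := by omega
  have h2 := getD_eq_of_lt_matchLen _ _ _ ht
  have hjw : j.val < w.length := by omega
  have e1 : w.reverse.getD (w.length - 1 - j.val) ' ' = w.getD j.val ' ' := by
    rw [List.getD_eq_getElem _ _ (by simp; omega), List.getD_eq_getElem _ _ hjw,
      List.getElem_reverse]
    have hidx : w.length - 1 - (w.length - 1 - j.val) = j.val := by omega
    simp [hidx]
  have e2 : codeL.reverse.getD (w.length - 1 - j.val) ' ' =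
      codeL.getD (j.val + (10 - w.length)) ' ' := by
    rw [List.getD_eq_getElem _ _ (by rw [List.length_reverse, codeL_len]; omega),
      List.getD_eq_getElem _ _ (by rw [codeL_len]; omega), List.getElem_reverse]
    have hidx : codeL.length - 1 - (w.length - 1 - j.val) = j.val + (10 - w.length) := by
      rw [codeL_len]; omega
    simp [hidx]
  rw [e1, e2] at h2
  rw [← h1, h2]

-- drop all but the last k elements, written via the reverse
theorem drop_eq_reverse_take (l : List Char) (k : Nat) (hk : k ≤ l.length) :
    l.drop (l.length - k) = (l.reverse.take k).reverse := by
  have h := List.reverse_drop (l := l) (i := l.length - k)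
  rw [show l.length - (l.length - k) = k from by omega] at h
  calc l.drop (l.length - k) = (l.drop (l.length - k)).reverse.reverse := by simp
    _ = (l.reverse.take k).reverse := by rw [h]

-- A's first test: w.take 10 = codeL ↔ the whole target is a prefix
theorem cond_prefix_iff (w : List Char) :
    (w.take 10 = codeL ↔ 10 ≤ matchLen w codeL) := by
  have h := take_eq_iff_le_matchLen 10 w codeL (by rw [codeL_len])
  rwa [show codeL.take 10 = codeL from rfl] at h

-- suffix condition: the last k characters of w (clamped, as Python's w[-k:]) equal the
-- last k of codeL iff the common suffix has length ≥ k
theorem cond_suffix_iff (w : List Char) (k : Nat) (hk : k ≤ 10) :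
    (w.drop (w.length - k) = codeL.drop (10 - k) ↔ k ≤ matchLen w.reverse codeL.reverse) := by
  by_cases hkn : k ≤ w.length
  · rw [drop_eq_reverse_take w k hkn,
      show (10 : Nat) - k = codeL.length - k from by rw [codeL_len],
      drop_eq_reverse_take codeL k (by rw [codeL_len]; omega), List.reverse_inj]
    exact take_eq_iff_le_matchLen k w.reverse codeL.reverse (by rw [List.length_reverse, codeL_len]; omega)
  · constructor
    · intro h
      exfalso
      have hl := congrArg List.length h
      simp only [List.length_drop, codeL_len] at hl
      omega
    · intro h
      exfalso
      have hle := matchLen_le_left w.reverse codeL.reverse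
      rw [List.length_reverse] at hle
      omega

theorem A_eq_true_iff (word : String) :
    is_cut_possible word = true ↔
      (10 ≤ matchLen word.toList codeL ∨
       10 ≤ matchLen word.toList.reverse codeL.reverse ∨
       ∃ i : Nat, 1 ≤ i ∧ i < 10 ∧ i ≤ matchLen word.toList codeL ∧
         10 - i ≤ matchLen word.toList.reverse codeL.reverse) := by
  have c1 : (PySem.List.slice word.toList none (some 10) == "CODEFORCES".toList) = true ↔
      10 ≤ matchLen word.toList codeL := by
    rw [beq_iff_eq, codeL_eq, show (10 : Int) = ((10 : Nat) : Int) from rfl,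
      PySem.List.slice_to_natCast]
    exact cond_prefix_iff word.toList
  have c2 : (PySem.List.slice word.toList (some (-10)) none == "CODEFORCES".toList) = true ↔
      10 ≤ matchLen word.toList.reverse codeL.reverse := by
    rw [beq_iff_eq, codeL_eq, show (-10 : Int) = -((10 : Nat) : Int) from rfl,
      PySem.List.slice_from_neg_natCast word.toList 10 (by omega)]
    have h := cond_suffix_iff word.toList 10 (by omega)
    rwa [show (10 : Nat) - 10 = 0 from rfl, List.drop_zero] at h
  simp only [is_cut_possible]
  split
  · rename_i h
    simp only [true_iff]
    exact Or.inl (c1.1 h)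
  · rename_i hne1
    split
    · rename_i h
      simp only [true_iff]
      exact Or.inr (Or.inl (c2.1 h))
    · rename_i hne2
      rw [List.any_eq_true]
      constructor
      · rintro ⟨i, hmem, hbody⟩
        rw [PySem.List.mem_pyRange_one] at hmem
        obtain ⟨h1, h2⟩ := hmem
        obtain ⟨k, rfl, hk1, hk2⟩ : ∃ k : Nat, i = (k : Int) ∧ 1 ≤ k ∧ k < 10 :=
          ⟨i.toNat, by omega, by omega, by omega⟩
        rw [Bool.and_eq_true, beq_iff_eq, beq_iff_eq] at hbody
        obtain ⟨hpre, hsuf⟩ := hbody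
        rw [PySem.List.slice_to_natCast, PySem.List.slice_to_natCast, codeL_eq] at hpre
        have hpre' : k ≤ matchLen word.toList codeL :=
          (take_eq_iff_le_matchLen k word.toList codeL (by rw [codeL_len]; omega)).1 hpre
        have hneg : ((k : Int) - 10) = -(((10 - k : Nat) : Int)) := by omega
        rw [hneg, PySem.List.slice_from_neg_natCast word.toList (10 - k) (by omega),
          PySem.List.slice_from_neg_natCast _ (10 - k) (by omega), codeL_eq, codeL_len] at hsuf
        have hsuf' : 10 - k ≤ matchLen word.toList.reverse codeL.reverse :=
          (cond_suffix_iff word.toList (10 - k) (by omega)).1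
            (by rwa [show (10 : Nat) - (10 - k) = k from by omega] at hsuf ⊢)
        exact Or.inr (Or.inr ⟨k, hk1, hk2, hpre', hsuf'⟩)
      · intro h
        rcases h with h | h | ⟨i, hi1, hi2, hip, his⟩
        · exact absurd (c1.2 h) (by simpa using hne1)
        · exact absurd (c2.2 h) (by simpa using hne2)
        · refine ⟨(i : Int), ?_, ?_⟩
          · rw [PySem.List.mem_pyRange_one]
            constructor <;> [omega; omega]
          · rw [Bool.and_eq_true, beq_iff_eq, beq_iff_eq]
            refine ⟨?_, ?_⟩
            · rw [PySem.List.slice_to_natCast, PySem.List.slice_to_natCast, codeL_eq]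
              exact (take_eq_iff_le_matchLen i word.toList codeL (by rw [codeL_len]; omega)).2 hip
            · have hneg : ((i : Int) - 10) = -(((10 - i : Nat) : Int)) := by omega
              rw [hneg, PySem.List.slice_from_neg_natCast word.toList (10 - i) (by omega),
                PySem.List.slice_from_neg_natCast _ (10 - i) (by omega), codeL_eq, codeL_len]
              exact (cond_suffix_iff word.toList (10 - i) (by omega)).2 his

theorem B_eq_true_iff (word : String) :
    is_cut_possible_alt word = true ↔
      (10 ≤ word.toList.length ∧
       10 ≤ matchLen word.toList codeL + matchLen word.toList.reverse codeL.reverse) := by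
  simp only [is_cut_possible_alt, codeL_eq]
  simp

-- ===== VERDICT (by name: the statement is the Claim_ definition above) =====
theorem is_cut_possible_spec : Claim_equal_is_cut_possible := by
  intro word _
  unfold Spec_is_cut_possible
  rw [Bool.eq_iff_iff, A_eq_true_iff, B_eq_true_iff]
  have hpw := matchLen_le_left word.toList codeL
  have hpc := matchLen_le_right word.toList codeL
  have hsw := matchLen_le_left word.toList.reverse codeL.reverse
  have hsc := matchLen_le_right word.toList.reverse codeL.reverse
  rw [List.length_reverse] at hsw
  rw [List.length_reverse, codeL_len] at hsc
  rw [codeL_len] at hpc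
  constructor
  · rintro (h | h | ⟨i, hi1, hi2, hip, his⟩)
    · exact ⟨by omega, by omega⟩
    · exact ⟨by omega, by omega⟩
    · refine ⟨?_, by omega⟩
      by_contra hlen
      exact length_ge_ten_of_overlap word.toList (by omega) (by omega)
  · rintro ⟨hn, hps⟩
    by_cases hp10 : 10 ≤ matchLen word.toList codeL
    · exact Or.inl hp10
    · by_cases hs10 : 10 ≤ matchLen word.toList.reverse codeL.reverse
      · exact Or.inr (Or.inl hs10)
      · exact Or.inr (Or.inr ⟨matchLen word.toList codeL, by omega, by omega, le_refl _, by omega⟩)
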